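-- pv_equiv track=rewrite | github.com/rainnn99/ProblemSolving_python | 프로그래머스/1/92334. 신고 결과 받기/신고 결과 받기.py | solution
-- ===== SOURCE A (Python) =====
-- def solution(id_list, report, k):
--     answer = []
--     id = {key: 0 for key in id_list}
--     total_report = {key: 0 for key in id_list}
--     decl = {}
--
--     for rep in report:
--         value, key = rep.split()
--         if key not in decl:
--             decl[key] = set()
--         decl[key].add(value)
--
--     for key in decl:
--         decl[key] = list(decl[key])
--
--     for rep in decl.keys():
--         if rep in total_report:
--             total_report[rep] = len(decl[rep])
--
--     for i in total_report.keys():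
--         if total_report[i] >= k:
--             for key in decl[i]:
--                 id[key] += 1
--
--     answer = list(id.values())
--
--     return answer
-- ===== SOURCE B (Python) =====
-- def solution(id_list, report, k):
--     # deduped (reporter, target) pairs, first occurrence order
--     seen = set()
--     pairs = []
--     for rep in report:
--         v, t = rep.split()
--         if (v, t) not in seen:
--             seen.add((v, t))
--             pairs.append((v, t))
--     ids = set(id_list)
--     suspended = {t for (_, t) in pairs
--                  if t in ids and sum(1 for (_, t2) in pairs if t2 == t) >= k}
--     out = {}
--     for u in id_list:
--         if u not in out:
--             out[u] = sum(1 for (v, t) in pairs if v == u and t in suspended)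
--     return list(out.values())
-- ===== Notes on version B (the rewrite author's own statement) =====
-- stated objective: alternative
-- what changed: Replaces A's dict-of-sets keyed by reported user with nested increment loops by a single deduped (reporter,target) pair list, a declaratively computed suspended set, and a per-reporter count written directly into an id_list-keyed dict (reporter-outer instead of reported-outer).
import Mathlib
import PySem

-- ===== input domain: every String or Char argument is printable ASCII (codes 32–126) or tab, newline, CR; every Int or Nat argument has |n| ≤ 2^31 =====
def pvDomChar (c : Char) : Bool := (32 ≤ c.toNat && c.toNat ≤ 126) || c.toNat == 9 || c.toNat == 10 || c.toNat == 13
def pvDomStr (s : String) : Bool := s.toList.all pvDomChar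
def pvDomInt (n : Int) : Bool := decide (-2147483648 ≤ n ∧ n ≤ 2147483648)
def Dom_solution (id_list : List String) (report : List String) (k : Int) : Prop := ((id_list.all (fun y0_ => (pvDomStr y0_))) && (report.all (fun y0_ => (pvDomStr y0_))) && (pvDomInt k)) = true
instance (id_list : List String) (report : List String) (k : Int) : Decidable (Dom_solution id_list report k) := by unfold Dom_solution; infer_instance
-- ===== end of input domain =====

-- B re-implements A with a single deduped (reporter,target) pair list plus declarative counting
-- (reporter-outer) instead of A's dict-of-sets keyed by target with nested increment loops; same cost class.

-- helpers shared by Pre_solution and the proofs (functions of the INPUT only: the parsed report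
-- pairs and the per-target distinct-reporter count); defined before the ports so the two-token
-- matcher they create belongs to no port.
def pvParse (rep : String) : Option (String × String) :=
  match PySem.Str.split₀ rep with | [v, t] => some (v, t) | _ => none
def pvPairs (report : List String) : List (String × String) := report.filterMap pvParse
def pvCnt (report : List String) (t : String) : Nat :=
  (PySem.List.dedup (pvPairs report)).countP (fun p => p.2 == t)

-- ===== PORT A =====
-- 'id[key] += 1' is ported as modify (KeyError on a missing key is excluded by Pre_solution);
-- 'for key in decl: decl[key] = list(decl[key])' is the identity on the List-backed Set model.
def solution (id_list : List String) (report : List String) (k : Int) : List Int :=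
  let id0 : PySem.Dict String Int := id_list.foldl (fun d key => d.insert key 0) PySem.Dict.empty
  let tr0 : PySem.Dict String Int := id_list.foldl (fun d key => d.insert key 0) PySem.Dict.empty
  let decl : PySem.Dict String (PySem.Set String) :=
    report.foldl (fun d rep =>
      match PySem.Str.split₀ rep with
      | [value, key] =>
          (if d.contains key then d else d.insert key PySem.Set.empty).modify key
            PySem.Set.empty (fun s => PySem.Set.add s value)
      | _ => d) PySem.Dict.empty
  let tr : PySem.Dict String Int :=
    decl.keys.foldl (fun d rep =>
      if d.contains rep then d.insert rep ((PySem.Set.len (decl.getD rep PySem.Set.empty) : Int)) else d) tr0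
  let idf : PySem.Dict String Int :=
    tr.keys.foldl (fun d i =>
      if k ≤ tr.getD i 0 then
        (decl.getD i PySem.Set.empty).foldl (fun d key => d.modify key 0 (· + 1)) d
      else d) id0
  idf.values

-- ===== PORT B =====
def solution_alt (id_list : List String) (report : List String) (k : Int) : List Int :=
  let ps : List (String × String) × PySem.Set (String × String) :=
    report.foldl (fun st rep =>
      match PySem.Str.split₀ rep with
      | [v, t] => if PySem.Set.contains st.2 (v, t) then st
                  else (st.1 ++ [(v, t)], PySem.Set.add st.2 (v, t))
      | _ => st) ([], PySem.Set.empty)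
  let pairs := ps.1
  let ids : PySem.Set String := PySem.Set.ofList id_list
  let susp : PySem.Set String :=
    PySem.Set.ofList ((pairs.filter (fun p =>
      PySem.Set.contains ids p.2 && decide (k ≤ (pairs.countP (fun q => q.2 == p.2) : Int)))).map (·.2))
  let out : PySem.Dict String Int :=
    id_list.foldl (fun d u =>
      if d.contains u then d
      else d.insert u ((pairs.countP (fun p => p.1 == u && PySem.Set.contains susp p.2) : Int)))
      PySem.Dict.empty
  out.values

-- ===== PRECONDITION & SPEC =====
-- Pre_ excludes exactly the inputs where A raises: a report line not splitting into two tokens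
-- (ValueError), k ≤ 0 with some id never reported (KeyError decl[i]), or a suspended user having a
-- reporter outside id_list (KeyError id[key] += 1).
def Pre_solution (id_list : List String) (report : List String) (k : Int) : Prop :=
  (∀ rep ∈ report, (PySem.Str.split₀ rep).length = 2) ∧
  (0 < k ∨ ∀ u ∈ id_list, ∃ p ∈ pvPairs report, p.2 = u) ∧
  (∀ p ∈ pvPairs report, p.2 ∈ id_list → k ≤ (pvCnt report p.2 : Int) → p.1 ∈ id_list)
instance (id_list : List String) (report : List String) (k : Int) : Decidable (Pre_solution id_list report k) := by unfold Pre_solution; infer_instance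
def pvWitness_solution : List String × List String × Int := (["muzi", "frodo"], ["muzi frodo"], 2)

def Spec_solution (id_list : List String) (report : List String) (k : Int) (out : List Int) : Prop := out = solution_alt id_list report k
instance (id_list : List String) (report : List String) (k : Int) (out : List Int) : Decidable (Spec_solution id_list report k out) := by unfold Spec_solution; infer_instance

-- ===== CLAIM (what is proved, stated in full; the proofs are below) =====
def Claim_equal_solution : Prop := ∀ (id_list : List String) (report : List String) (k : Int), Dom_solution id_list report k → Pre_solution id_list report k → Spec_solution id_list report k (solution id_list report k)

-- ===== LEMMAS AND PROOFS =====

-- shared abbreviations for the proofs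
def pvD (report : List String) : List (String × String) := PySem.List.dedup (pvPairs report)
def pvPred (id_list : List String) (report : List String) (k : Int) (u : String)
    (p : String × String) : Bool :=
  decide (p.1 = u ∧ p.2 ∈ id_list ∧ k ≤ (pvCnt report p.2 : Int))
def pvOut (id_list : List String) (report : List String) (k : Int) : List Int :=
  (PySem.List.dedup id_list).map (fun u => ((pvD report).countP (pvPred id_list report k u) : Int))

-- two Nodup lists with the same members have the same length
theorem pvNodupLen {α : Type} (l₁ l₂ : List α) (h1 : l₁.Nodup) (h2 : l₂.Nodup)
    (h : ∀ a, a ∈ l₁ ↔ a ∈ l₂) : l₁.length = l₂.length :=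
  ((List.perm_ext_iff_of_nodup h1 h2).2 h).length_eq

-- a fold whose body pattern-matches a two-token split is a fold over the parsed pairs
theorem pvFoldlParse {β : Type} (f : β → String × String → β) (report : List String) (d : β) :
    report.foldl (fun d rep =>
      match PySem.Str.split₀ rep with
      | [v, t] => f d (v, t)
      | _ => d) d = (pvPairs report).foldl f d := by
  induction report generalizing d with
  | nil => rfl
  | cons rep rest ih =>
      simp only [List.foldl_cons, pvPairs, pvParse, List.filterMap_cons]
      rcases h : PySem.Str.split₀ rep with _ | ⟨v, _ | ⟨t, _ | _⟩⟩ <;>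
        simp only <;> exact ih _

theorem pvSetAddMem {α : Type} [BEq α] [LawfulBEq α] (s : PySem.Set α) (x : α) (h : x ∈ s) :
    PySem.Set.add s x = s := by
  unfold PySem.Set.add PySem.Set.contains
  rw [if_pos (List.contains_iff_mem.2 h)]

theorem pvSetAddNotMem {α : Type} [BEq α] [LawfulBEq α] (s : PySem.Set α) (x : α) (h : x ∉ s) :
    PySem.Set.add s x = s ++ [x] := by
  unfold PySem.Set.add PySem.Set.contains
  rw [if_neg (fun hc => h (List.contains_iff_mem.1 hc))]

-- Set.update by elements already present is the identity
theorem pvUpdateOfSubset (s : PySem.Set String) (l : List String)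
    (h : ∀ x ∈ l, x ∈ s) : PySem.Set.update s l = s := by
  induction l generalizing s with
  | nil => rfl
  | cons x rest ih =>
      show PySem.Set.update (PySem.Set.add s x) rest = s
      rw [pvSetAddMem s x (h x (List.mem_cons_self ..))]
      exact ih s (fun y hy => h y (List.mem_cons_of_mem _ hy))

-- a fold of constant-0 inserts leaves every getD at 0
theorem pvZeroGetD (l : List String) (d : PySem.Dict String Int) (hd : ∀ v, d.getD v 0 = 0)
    (u : String) : (l.foldl (fun d key => d.insert key 0) d).getD u 0 = 0 := by
  induction l generalizing d with
  | nil => exact hd u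
  | cons x rest ih =>
      refine ih _ (fun v => ?_)
      rw [PySem.Dict.getD_insert]
      split <;> simp [hd]

-- the conditional-insert fold (total_report): keys and getD
theorem pvCondKeys (g : String → Int) (xs : List String) (d : PySem.Dict String Int) :
    (xs.foldl (fun d t => if d.contains t then d.insert t (g t) else d) d).keys = d.keys := by
  induction xs generalizing d with
  | nil => rfl
  | cons x rest ih =>
      simp only [List.foldl_cons]
      by_cases hc : d.contains x = true
      · rw [if_pos hc, ih, PySem.Dict.keys_insert_of_contains _ _ hc]
      · rw [if_neg hc, ih]

theorem pvCondGetD (g : String → Int) (xs : List String) (d : PySem.Dict String Int)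
    (u : String) :
    (xs.foldl (fun d t => if d.contains t then d.insert t (g t) else d) d).getD u 0
      = if u ∈ xs ∧ d.contains u = true then g u else d.getD u 0 := by
  induction xs generalizing d with
  | nil => simp
  | cons x rest ih =>
      simp only [List.foldl_cons]
      by_cases hc : d.contains x = true
      · rw [if_pos hc, ih]
        by_cases hx : u = x
        · subst hx
          have hcu : (d.insert u (g u)).contains u = true := by
            rw [PySem.Dict.contains_insert]; simp
          simp only [hcu, hc, List.mem_cons, true_or, and_true, if_pos]
          by_cases hm : u ∈ rest
          · simp [hm]
          · simp [hm]
        · have hbe : (u == x) = false := beq_eq_false_iff_ne.mpr hx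
          rw [PySem.Dict.contains_insert, PySem.Dict.getD_insert, hbe, Bool.false_or, if_neg hx]
          simp only [List.mem_cons, hx, false_or]
      · rw [if_neg hc, ih]
        by_cases hx : u = x
        · subst hx; simp [hc]
        · simp [List.mem_cons, hx]

-- the guarded-insert fold (B's out dict): getD and keys
theorem pvGuardGetD (g : String → Int) (xs : List String) (d : PySem.Dict String Int)
    (u : String) :
    (xs.foldl (fun d x => if d.contains x then d else d.insert x (g x)) d).getD u 0
      = if u ∈ xs ∧ d.contains u = false then g u else d.getD u 0 := by
  induction xs generalizing d with
  | nil => simp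
  | cons x rest ih =>
      simp only [List.foldl_cons]
      by_cases hc : d.contains x = true
      · rw [if_pos hc, ih]
        by_cases hx : u = x
        · subst hx; simp [hc]
        · simp only [List.mem_cons, hx, false_or]
      · rw [if_neg hc, ih]
        by_cases hx : u = x
        · subst hx
          have hcf : d.contains u = false := by simpa using hc
          have hcu : (d.insert u (g u)).contains u = true := by
            rw [PySem.Dict.contains_insert]; simp
          rw [PySem.Dict.getD_insert]
          simp [hcu, hcf]
        · have hbe : (u == x) = false := beq_eq_false_iff_ne.mpr hx
          rw [PySem.Dict.contains_insert, PySem.Dict.getD_insert, hbe, Bool.false_or, if_neg hx]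
          simp only [List.mem_cons, hx, false_or]

theorem pvGuardKeys (g : String → Int) (xs : List String) (d : PySem.Dict String Int) :
    (xs.foldl (fun d x => if d.contains x then d else d.insert x (g x)) d).keys
      = PySem.Set.update d.keys xs := by
  induction xs generalizing d with
  | nil => rfl
  | cons x rest ih =>
      simp only [List.foldl_cons]
      show _ = PySem.Set.update (PySem.Set.add d.keys x) rest
      by_cases hc : d.contains x = true
      · rw [if_pos hc, ih, pvSetAddMem _ _ ((PySem.Dict.contains_iff_mem_keys _ _).1 hc)]
      · have hcf : d.contains x = false := by simpa using hc
        have hnm : x ∉ d.keys := fun hmem => by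
          have h2 := (PySem.Dict.contains_iff_mem_keys d x).2 hmem
          rw [hcf] at h2; exact Bool.false_ne_true h2
        rw [if_neg hc, ih, PySem.Dict.keys_insert_of_not_contains _ _ hcf,
          pvSetAddNotMem _ _ hnm]

-- the decl-building step: getD and keys
theorem pvDeclStepGetD (d : PySem.Dict String (PySem.Set String)) (p : String × String)
    (t : String) :
    ((if d.contains p.2 then d else d.insert p.2 PySem.Set.empty).modify p.2
        PySem.Set.empty (fun s => PySem.Set.add s p.1)).getD t PySem.Set.empty
      = if t = p.2 then PySem.Set.add (d.getD p.2 PySem.Set.empty) p.1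
        else d.getD t PySem.Set.empty := by
  by_cases hc : d.contains p.2 = true
  · rw [if_pos hc, PySem.Dict.getD_modify]
  · have hcf : d.contains p.2 = false := by simpa using hc
    rw [if_neg hc, PySem.Dict.getD_modify]
    rw [PySem.Dict.getD_of_not_contains d PySem.Set.empty hcf]
    by_cases ht : t = p.2
    · simp [ht]
    · simp [ht, PySem.Dict.getD_insert]

theorem pvDeclGetD (l : List (String × String)) (d : PySem.Dict String (PySem.Set String))
    (t : String) :
    (l.foldl (fun d p => (if d.contains p.2 then d else d.insert p.2 PySem.Set.empty).modify p.2
        PySem.Set.empty (fun s => PySem.Set.add s p.1)) d).getD t PySem.Set.empty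
      = PySem.Set.update (d.getD t PySem.Set.empty) ((l.filter (fun p => p.2 == t)).map Prod.fst) := by
  induction l generalizing d with
  | nil => rfl
  | cons p rest ih =>
      simp only [List.foldl_cons, List.filter_cons]
      rw [ih, pvDeclStepGetD]
      by_cases ht : p.2 = t
      · subst ht
        rw [if_pos rfl]
        have hbe : (p.2 == p.2) = true := by simp
        rw [hbe]
        simp only [if_true, List.map_cons]
        rfl
      · have hbe : (p.2 == t) = false := beq_eq_false_iff_ne.mpr ht
        rw [hbe, if_neg (fun h => ht (Eq.symm h))]
        simp only [Bool.false_eq_true, if_false]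

theorem pvDeclStepKeys (d : PySem.Dict String (PySem.Set String)) (p : String × String) :
    ((if d.contains p.2 then d else d.insert p.2 PySem.Set.empty).modify p.2
        PySem.Set.empty (fun s => PySem.Set.add s p.1)).keys
      = PySem.Set.add d.keys p.2 := by
  rw [PySem.Dict.keys_modify]
  by_cases hc : d.contains p.2 = true
  · rw [if_pos hc, PySem.Dict.keys_insert_of_contains _ _ hc,
      pvSetAddMem _ _ ((PySem.Dict.contains_iff_mem_keys _ _).1 hc)]
  · have hcf : d.contains p.2 = false := by simpa using hc
    have hnm : p.2 ∉ d.keys := fun hmem => by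
      have h2 := (PySem.Dict.contains_iff_mem_keys d p.2).2 hmem
      rw [hcf] at h2; exact Bool.false_ne_true h2
    rw [if_neg hc]
    have h2 : (d.insert p.2 PySem.Set.empty).contains p.2 = true := by
      rw [PySem.Dict.contains_insert]; simp
    rw [PySem.Dict.keys_insert_of_contains _ _ h2,
      PySem.Dict.keys_insert_of_not_contains _ _ hcf, pvSetAddNotMem _ _ hnm]

theorem pvDeclKeys (l : List (String × String)) (d : PySem.Dict String (PySem.Set String)) :
    (l.foldl (fun d p => (if d.contains p.2 then d else d.insert p.2 PySem.Set.empty).modify p.2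
        PySem.Set.empty (fun s => PySem.Set.add s p.1)) d).keys
      = PySem.Set.update d.keys (l.map Prod.snd) := by
  induction l generalizing d with
  | nil => rfl
  | cons p rest ih =>
      simp only [List.foldl_cons, List.map_cons]
      rw [ih, pvDeclStepKeys]
      rfl

-- the distinct-reporter set of t has pvCnt-many elements
theorem pvLenDecl (l : List (String × String)) (t : String) :
    (PySem.Set.ofList ((l.filter (fun p => p.2 == t)).map Prod.fst)).length
      = (PySem.List.dedup l).countP (fun p => p.2 == t) := by
  rw [List.countP_eq_length_filter]
  have hlen : ((PySem.List.dedup l).filter (fun p => p.2 == t)).length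
      = (((PySem.List.dedup l).filter (fun p => p.2 == t)).map Prod.fst).length := by
    rw [List.length_map]
  rw [hlen]
  apply pvNodupLen
  · exact PySem.Set.nodup_ofList _
  · apply List.Nodup.map_on
    · intro x hx y hy hfst
      have hx2 : x.2 = t := by simpa using (List.of_mem_filter hx)
      have hy2 : y.2 = t := by simpa using (List.of_mem_filter hy)
      exact Prod.ext hfst (hx2.trans hy2.symm)
    · exact (PySem.List.nodup_dedup l).filter _
  · intro a
    rw [PySem.Set.mem_ofList]
    simp only [List.mem_map, List.mem_filter, beq_iff_eq, PySem.List.mem_dedup]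

-- the suspension double loop: getD accumulates per-target membership counts
theorem pvSumGetD (S : List String) (R : String → List String) (d : PySem.Dict String Int)
    (u : String) :
    (S.foldl (fun d i => (R i).foldl (fun d key => d.modify key 0 (· + 1)) d) d).getD u 0
      = d.getD u 0 + (S.map (fun i => (List.count u (R i) : Int))).sum := by
  induction S generalizing d with
  | nil => simp
  | cons i rest ih =>
      simp only [List.foldl_cons, List.map_cons, List.sum_cons]
      rw [ih, PySem.Dict.getD_foldl_modify_add_one]
      ring

theorem pvSumKeys (S : List String) (R : String → List String) (d : PySem.Dict String Int)
    (h : ∀ i ∈ S, ∀ v ∈ R i, v ∈ d.keys) :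
    (S.foldl (fun d i => (R i).foldl (fun d key => d.modify key 0 (· + 1)) d) d).keys
      = d.keys := by
  induction S generalizing d with
  | nil => rfl
  | cons i rest ih =>
      simp only [List.foldl_cons]
      have hkeys : ((R i).foldl (fun d key => d.modify key 0 (· + 1)) d).keys = d.keys := by
        rw [PySem.Dict.keys_foldl_modify (f := fun _ _ => (· + 1))]
        exact pvUpdateOfSubset _ _ (h i (List.mem_cons_self ..))
      rw [ih]
      · exact hkeys
      · intro j hj v hv
        rw [hkeys]
        exact h j (List.mem_cons_of_mem _ hj) v hv

-- double counting: pairs (u, i) with i ∈ S vs elements of D with first component u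
theorem pvCross {α β : Type} [DecidableEq α] [DecidableEq β] (S : List α) (D : List (β × α))
    (u : β) (hS : S.Nodup) (hD : D.Nodup) :
    S.countP (fun i => decide ((u, i) ∈ D)) = D.countP (fun p => decide (p.1 = u ∧ p.2 ∈ S)) := by
  rw [List.countP_eq_length_filter, List.countP_eq_length_filter]
  have hlen : (D.filter (fun p => decide (p.1 = u ∧ p.2 ∈ S))).length
      = ((D.filter (fun p => decide (p.1 = u ∧ p.2 ∈ S))).map Prod.snd).length := by
    rw [List.length_map]
  rw [hlen]
  apply pvNodupLen
  · exact hS.filter _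
  · apply List.Nodup.map_on
    · intro x hx y hy hsnd
      have hx1 : x.1 = u := ((by simpa using (List.of_mem_filter hx)) : x.1 = u ∧ x.2 ∈ S).1
      have hy1 : y.1 = u := ((by simpa using (List.of_mem_filter hy)) : y.1 = u ∧ y.2 ∈ S).1
      exact Prod.ext (hx1.trans hy1.symm) hsnd
    · exact hD.filter _
  · intro a
    simp only [List.mem_filter, List.mem_map, decide_eq_true_eq]
    constructor
    · rintro ⟨ha, hm⟩
      exact ⟨(u, a), ⟨hm, rfl, ha⟩, rfl⟩
    · rintro ⟨p, ⟨hp, h1, h2⟩, hs⟩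
      have hpe : p = (u, a) := Prod.ext h1 hs
      subst hpe
      exact ⟨h2, hp⟩

-- B's deduplicating pair loop maintains pairs = seen
theorem pvPairsFold (l : List (String × String)) (s : PySem.Set (String × String)) :
    (l.foldl (fun st p => if PySem.Set.contains st.2 p then st
        else (st.1 ++ [p], PySem.Set.add st.2 p)) ((s, s) : List (String × String) × PySem.Set (String × String)))
      = (PySem.Set.update s l, PySem.Set.update s l) := by
  induction l generalizing s with
  | nil => rfl
  | cons p rest ih =>
      simp only [List.foldl_cons]
      show (rest.foldl _ (if PySem.Set.contains s p then (s, s) else (s ++ [p], PySem.Set.add s p)))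
        = (PySem.Set.update (PySem.Set.add s p) rest, PySem.Set.update (PySem.Set.add s p) rest)
      by_cases hc : PySem.Set.contains s p = true
      · rw [if_pos hc]
        have hadd : PySem.Set.add s p = s := by unfold PySem.Set.add; rw [if_pos hc]
        rw [hadd]
        exact ih s
      · rw [if_neg hc]
        have hadd : PySem.Set.add s p = s ++ [p] := by unfold PySem.Set.add; rw [if_neg hc]
        rw [← hadd]
        exact ih _

-- characterization of port A
theorem pvAChar (id_list : List String) (report : List String) (k : Int)
    (hP : Pre_solution id_list report k) :
    solution id_list report k = pvOut id_list report k := by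
  obtain ⟨-, -, h3⟩ := hP
  simp only [solution]
  have h1 : report.foldl (fun d rep =>
      match PySem.Str.split₀ rep with
      | [value, key] =>
          (if d.contains key then d else d.insert key PySem.Set.empty).modify key
            PySem.Set.empty (fun s => PySem.Set.add s value)
      | _ => d) PySem.Dict.empty
      = (pvPairs report).foldl (fun d p =>
          (if d.contains p.2 then d else d.insert p.2 PySem.Set.empty).modify p.2
            PySem.Set.empty (fun s => PySem.Set.add s p.1)) PySem.Dict.empty :=
    pvFoldlParse (f := fun d p =>
      (if d.contains p.2 then d else d.insert p.2 PySem.Set.empty).modify p.2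
        PySem.Set.empty (fun s => PySem.Set.add s p.1)) report PySem.Dict.empty
  rw [h1]
  set decl := (pvPairs report).foldl (fun d p =>
      (if d.contains p.2 then d else d.insert p.2 PySem.Set.empty).modify p.2
        PySem.Set.empty (fun s => PySem.Set.add s p.1)) PySem.Dict.empty with hdecl
  have hupd : ∀ {α : Type} [BEq α] (l : List α),
      PySem.Set.update ([] : PySem.Set α) l = PySem.Set.ofList l :=
    fun l => (PySem.Set.ofList_eq_foldl l).symm
  have hdGetD : ∀ t, decl.getD t PySem.Set.empty
      = PySem.Set.ofList (((pvPairs report).filter (fun p => p.2 == t)).map Prod.fst) := by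
    intro t
    rw [hdecl, pvDeclGetD, PySem.Dict.getD_empty]
    exact hupd _
  have hdKeysMem : ∀ t, t ∈ decl.keys ↔ ∃ p ∈ pvPairs report, p.2 = t := by
    intro t
    rw [hdecl, pvDeclKeys, PySem.Dict.keys_empty, hupd, PySem.Set.mem_ofList]
    simp only [List.mem_map]
  have htr0keys : (id_list.foldl (fun d key => d.insert key 0)
      (PySem.Dict.empty : PySem.Dict String Int)).keys = PySem.Set.ofList id_list := by
    rw [PySem.Dict.keys_foldl_insert (f := fun _ _ => (0 : Int)), PySem.Dict.keys_empty]
    exact hupd _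
  have hzero : ∀ u, (id_list.foldl (fun d key => d.insert key 0)
      (PySem.Dict.empty : PySem.Dict String Int)).getD u 0 = 0 := by
    intro u
    exact pvZeroGetD _ _ (fun v => PySem.Dict.getD_empty ..) u
  set tr := decl.keys.foldl (fun d rep =>
      if d.contains rep then d.insert rep (PySem.Set.len (decl.getD rep PySem.Set.empty)) else d)
      (id_list.foldl (fun d key => d.insert key 0) PySem.Dict.empty) with htr
  have htrGetD : ∀ i ∈ id_list, tr.getD i 0 = (pvCnt report i : Int) := by
    intro i hi
    rw [htr, pvCondGetD]
    have hcont : (id_list.foldl (fun d key => d.insert key 0)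
        (PySem.Dict.empty : PySem.Dict String Int)).contains i = true := by
      rw [PySem.Dict.contains_iff_mem_keys, htr0keys, PySem.Set.mem_ofList]
      exact hi
    by_cases hmem : i ∈ decl.keys
    · rw [if_pos ⟨hmem, hcont⟩]
      have hlen := pvLenDecl (pvPairs report) i
      rw [← hdGetD i] at hlen
      unfold pvCnt
      rw [← hlen]
      simp [PySem.Set.len]
    · rw [if_neg (fun hand => hmem hand.1), hzero]
      have hcnt : pvCnt report i = 0 := by
        unfold pvCnt
        rw [List.countP_eq_zero]
        intro p hp
        simp only [beq_iff_eq]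
        intro hpi
        exact hmem ((hdKeysMem i).2 ⟨p, (PySem.List.mem_dedup ..).1 hp, hpi⟩)
      rw [hcnt]
      rfl
  have htrkeys : tr.keys = PySem.Set.ofList id_list := by
    rw [htr, pvCondKeys, htr0keys]
  have h2 : tr.keys.foldl (fun d i =>
      if k ≤ tr.getD i 0 then
        (decl.getD i PySem.Set.empty).foldl (fun d key => d.modify key 0 (· + 1)) d
      else d) ((id_list.foldl (fun d key => d.insert key 0) PySem.Dict.empty : PySem.Dict String Int))
      = (tr.keys.filter (fun i => decide (k ≤ tr.getD i 0))).foldl (fun d i =>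
          (decl.getD i PySem.Set.empty).foldl (fun d key => d.modify key 0 (· + 1)) d)
          ((id_list.foldl (fun d key => d.insert key 0) PySem.Dict.empty : PySem.Dict String Int)) :=
    PySem.List.foldl_ite_eq_foldl_filter _ _ _ _
  refine Eq.trans (congrArg PySem.Dict.values h2) ?_
  set S := tr.keys.filter (fun i => decide (k ≤ tr.getD i 0)) with hSdef
  have hSmem : ∀ i, i ∈ S ↔ i ∈ id_list ∧ k ≤ (pvCnt report i : Int) := by
    intro i
    rw [hSdef, List.mem_filter, htrkeys, PySem.Set.mem_ofList]
    constructor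
    · rintro ⟨hi, hk⟩
      rw [decide_eq_true_eq, htrGetD i hi] at hk
      exact ⟨hi, hk⟩
    · rintro ⟨hi, hk⟩
      refine ⟨hi, ?_⟩
      rw [decide_eq_true_eq, htrGetD i hi]
      exact hk
  have hRmem : ∀ i u, u ∈ decl.getD i PySem.Set.empty ↔ (u, i) ∈ pvD report := by
    intro i u
    rw [hdGetD i, PySem.Set.mem_ofList, pvD, PySem.List.mem_dedup]
    simp only [List.mem_map, List.mem_filter, beq_iff_eq]
    constructor
    · rintro ⟨p, ⟨hp, h2'⟩, h1'⟩
      have : p = (u, i) := Prod.ext h1' h2'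
      rw [← this]; exact hp
    · intro hm
      exact ⟨(u, i), ⟨hm, rfl⟩, rfl⟩
  have hkeysS : ∀ i ∈ S, ∀ v ∈ decl.getD i PySem.Set.empty,
      v ∈ (id_list.foldl (fun d key => d.insert key 0)
        (PySem.Dict.empty : PySem.Dict String Int)).keys := by
    intro i hi v hv
    rw [htr0keys, PySem.Set.mem_ofList]
    obtain ⟨hiid, hik⟩ := (hSmem i).1 hi
    exact h3 (v, i) ((PySem.List.mem_dedup (pvPairs report) (v, i)).1 ((hRmem i v).1 hv)) hiid hik
  have hkeys : (S.foldl (fun d i =>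
      (decl.getD i PySem.Set.empty).foldl (fun d key => d.modify key 0 (· + 1)) d)
      ((id_list.foldl (fun d key => d.insert key 0) PySem.Dict.empty : PySem.Dict String Int))).keys
      = PySem.Set.ofList id_list := by
    rw [pvSumKeys _ _ _ hkeysS, htr0keys]
  have hnd : (S.foldl (fun d i =>
      (decl.getD i PySem.Set.empty).foldl (fun d key => d.modify key 0 (· + 1)) d)
      ((id_list.foldl (fun d key => d.insert key 0) PySem.Dict.empty : PySem.Dict String Int))).keys.Nodup := by
    rw [hkeys]; exact PySem.Set.nodup_ofList _
  rw [PySem.Dict.values_eq_map_keys _ hnd 0, hkeys]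
  unfold pvOut
  rw [PySem.List.dedup_eq_ofList]
  apply List.map_congr_left
  intro u hu
  rw [pvSumGetD, hzero, zero_add]
  have hSnodup : S.Nodup := by
    rw [hSdef, htrkeys]
    exact (PySem.Set.nodup_ofList _).filter _
  have hcount : ∀ i ∈ S, ((List.count u (decl.getD i PySem.Set.empty) : Int))
      = if (fun i => decide ((u, i) ∈ pvD report)) i = true then (1 : Int) else 0 := by
    intro i _
    by_cases hm : (u, i) ∈ pvD report
    · rw [if_pos (by simpa using hm)]
      have := List.count_eq_one_of_mem
        (by rw [hdGetD i]; exact PySem.Set.nodup_ofList _) ((hRmem i u).2 hm)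
      rw [this]; rfl
    · rw [if_neg (by simpa using hm)]
      have := List.count_eq_zero_of_not_mem (fun hvm => hm ((hRmem i u).1 hvm))
      rw [this]; rfl
  rw [List.map_congr_left hcount, PySem.List.sum_map_ite_one_zero,
    pvCross S (pvD report) u hSnodup (PySem.List.nodup_dedup _),
    List.countP_congr]
  intro p hp
  simp only [decide_eq_true_eq, pvPred, hSmem p.2]

-- characterization of port B
theorem pvBChar (id_list : List String) (report : List String) (k : Int) :
    solution_alt id_list report k = pvOut id_list report k := by
  simp only [solution_alt]
  have h1 : report.foldl (fun st rep =>
      match PySem.Str.split₀ rep with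
      | [v, t] => if PySem.Set.contains st.2 (v, t) then st
                  else (st.1 ++ [(v, t)], PySem.Set.add st.2 (v, t))
      | _ => st) (([], PySem.Set.empty) : List (String × String) × PySem.Set (String × String))
      = (pvPairs report).foldl (fun st p =>
          if PySem.Set.contains st.2 p then st
          else (st.1 ++ [p], PySem.Set.add st.2 p)) ([], PySem.Set.empty) :=
    pvFoldlParse (f := fun st p =>
      if PySem.Set.contains st.2 p then st
      else (st.1 ++ [p], PySem.Set.add st.2 p)) report ([], PySem.Set.empty)
  rw [h1]
  have h1b : (pvPairs report).foldl (fun st p =>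
      if PySem.Set.contains st.2 p then st
      else (st.1 ++ [p], PySem.Set.add st.2 p)) ([], PySem.Set.empty)
      = (pvD report, pvD report) := by
    have h := pvPairsFold (pvPairs report) PySem.Set.empty
    rw [show (PySem.Set.update PySem.Set.empty (pvPairs report) : PySem.Set (String × String))
        = pvD report from by
      rw [pvD, PySem.List.dedup_eq_ofList]; exact (PySem.Set.ofList_eq_foldl _).symm] at h
    exact h
  rw [h1b]
  dsimp only
  have hsusp : ∀ p ∈ pvD report,
      (PySem.Set.contains (PySem.Set.ofList (((pvD report).filter (fun p =>
          PySem.Set.contains (PySem.Set.ofList id_list) p.2 &&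
            decide (k ≤ ((pvD report).countP (fun q => q.2 == p.2) : Int)))).map (fun p => p.2)))
        p.2 = true) ↔ (p.2 ∈ id_list ∧ k ≤ (pvCnt report p.2 : Int)) := by
    intro p hp
    rw [show ∀ (s : PySem.Set String) (x : String), PySem.Set.contains s x = List.contains s x
      from fun _ _ => rfl]
    rw [List.contains_iff_mem, PySem.Set.mem_ofList]
    simp only [List.mem_map, List.mem_filter, Bool.and_eq_true, decide_eq_true_eq]
    constructor
    · rintro ⟨q, ⟨hq, hqid, hqk⟩, hqt⟩
      rw [show PySem.Set.contains (PySem.Set.ofList id_list) q.2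
          = List.contains (PySem.Set.ofList id_list) q.2 from rfl, List.contains_iff_mem,
        PySem.Set.mem_ofList] at hqid
      rw [← hqt]
      exact ⟨hqid, hqk⟩
    · rintro ⟨hid, hk⟩
      refine ⟨p, ⟨hp, ?_, hk⟩, rfl⟩
      rw [show PySem.Set.contains (PySem.Set.ofList id_list) p.2
          = List.contains (PySem.Set.ofList id_list) p.2 from rfl, List.contains_iff_mem,
        PySem.Set.mem_ofList]
      exact hid
  have hkeys : (id_list.foldl (fun d u =>
      if d.contains u then d
      else d.insert u (((pvD report).countP (fun p => p.1 == u &&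
        PySem.Set.contains (PySem.Set.ofList (((pvD report).filter (fun p =>
          PySem.Set.contains (PySem.Set.ofList id_list) p.2 &&
            decide (k ≤ ((pvD report).countP (fun q => q.2 == p.2) : Int)))).map (fun p => p.2)))
          p.2) : Int))) PySem.Dict.empty).keys = PySem.Set.ofList id_list := by
    rw [pvGuardKeys, PySem.Dict.keys_empty]
    exact (PySem.Set.ofList_eq_foldl _).symm
  have hnd : (id_list.foldl (fun d u =>
      if d.contains u then d
      else d.insert u (((pvD report).countP (fun p => p.1 == u &&
        PySem.Set.contains (PySem.Set.ofList (((pvD report).filter (fun p =>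
          PySem.Set.contains (PySem.Set.ofList id_list) p.2 &&
            decide (k ≤ ((pvD report).countP (fun q => q.2 == p.2) : Int)))).map (fun p => p.2)))
          p.2) : Int))) PySem.Dict.empty).keys.Nodup := by
    rw [hkeys]; exact PySem.Set.nodup_ofList _
  rw [PySem.Dict.values_eq_map_keys _ hnd 0, hkeys]
  unfold pvOut
  rw [PySem.List.dedup_eq_ofList]
  apply List.map_congr_left
  intro u hu
  rw [pvGuardGetD]
  rw [if_pos ⟨(PySem.Set.mem_ofList ..).1 hu, PySem.Dict.contains_empty ..⟩]
  congr 1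
  apply List.countP_congr
  intro p hp
  simp only [Bool.and_eq_true, beq_iff_eq, pvPred, decide_eq_true_eq]
  rw [hsusp p hp]

-- ===== VERDICT (by name: the statement is the Claim_ definition above) =====
theorem solution_spec : Claim_equal_solution := by
  intro id_list report k _ hP
  unfold Spec_solution
  rw [pvAChar id_list report k hP, pvBChar id_list report k]
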